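-- pv_equiv track=rewrite | github.com/YoshiBrightside/Ode-to-my-Failures | ICPC/Repechaje201018/New folder/acm/I.py | aBinario
-- ===== SOURCE A (Python) =====
-- def aBinario(oct):
--     res = []
--     while oct > 0:
--         res.append(oct % 2)
--         oct //= 2
--     return list(
--         reversed(
--             (res + [0 for i in range(8 - len(res))])))
-- ===== SOURCE B (Python) =====
-- def aBinario(oct):
--     n = oct if oct > 0 else 0
--     width = max(8, n.bit_length())
--     return [n // 2 ** i % 2 for i in range(width - 1, -1, -1)]
-- ===== Notes on version B (the rewrite author's own statement) =====
-- stated objective: simpler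
-- what changed: Replaces A's LSB-extraction loop + pad + reverse with computing the output width once (max(8, bit_length)) and emitting bits most-significant first in a single comprehension.
import Mathlib
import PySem

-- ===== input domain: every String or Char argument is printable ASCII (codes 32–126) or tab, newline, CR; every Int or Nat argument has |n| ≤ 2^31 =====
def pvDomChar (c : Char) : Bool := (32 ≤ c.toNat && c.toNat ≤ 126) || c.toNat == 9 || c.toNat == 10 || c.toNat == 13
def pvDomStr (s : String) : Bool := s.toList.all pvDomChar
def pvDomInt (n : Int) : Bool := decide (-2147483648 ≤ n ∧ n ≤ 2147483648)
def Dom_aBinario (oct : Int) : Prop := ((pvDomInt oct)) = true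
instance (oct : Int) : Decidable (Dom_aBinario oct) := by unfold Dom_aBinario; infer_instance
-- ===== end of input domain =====

-- B computes the output width once (max(8, bit_length)) and emits bits MSB-first in one pass,
-- instead of A's LSB-extraction loop followed by padding and reversal; objective: simpler.

-- ===== PORT A =====
-- the while loop of A: extract bits LSB-first while oct > 0
def aBinarioLoop (oct : Int) (res : List Int) : List Int :=
  if _h : oct > 0 then
    aBinarioLoop (PySem.Int.floordiv oct 2) (res ++ [PySem.Int.mod oct 2])
  else res
termination_by oct.toNat
decreasing_by
  simp only [PySem.Int.floordiv_eq_ediv_of_pos (by omega : (0:Int) < 2)]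
  omega

def aBinario (oct : Int) : List Int :=
  let res := aBinarioLoop oct []
  (res ++ List.replicate ((8 - (res.length : Int)).toNat) 0).reverse

-- ===== PORT B =====
def aBinario_alt (oct : Int) : List Int :=
  let n := if oct > 0 then oct else 0
  let width : Int := max 8 ((PySem.Int.bitLength n : Nat) : Int)
  (PySem.List.pyRange (width - 1) (-1) (-1)).map
    (fun i => PySem.Int.mod (PySem.Int.floordiv n (2 ^ i.toNat)) 2)

-- ===== PRECONDITION & SPEC =====
def Spec_aBinario (oct : Int) (out : List Int) : Prop := out = aBinario_alt oct
instance (oct : Int) (out : List Int) : Decidable (Spec_aBinario oct out) := by unfold Spec_aBinario; infer_instance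

-- ===== CLAIM (what is proved, stated in full; the proofs are below) =====
def Claim_equal_aBinario : Prop := ∀ (oct : Int), Dom_aBinario oct → Spec_aBinario oct (aBinario oct)

-- ===== LEMMAS AND PROOFS =====

-- bit k of n (the value both programs place at LSB-position k)
def pvBit (n : Int) (k : Nat) : Int := PySem.Int.mod (PySem.Int.floordiv n (2 ^ k)) 2

lemma pvBit_succ (n : Int) (k : Nat) :
    pvBit n (k + 1) = pvBit (PySem.Int.floordiv n 2) k := by
  have h2 : (0:Int) < 2 := by omega
  have hp : (0:Int) < 2 ^ k := by positivity
  unfold pvBit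
  rw [PySem.Int.floordiv_eq_ediv_of_pos h2, PySem.Int.floordiv_eq_ediv_of_pos hp,
      PySem.Int.floordiv_eq_ediv_of_pos (by positivity)]
  congr 1
  rw [Int.ediv_ediv_of_nonneg (by omega), pow_succ, mul_comm]

lemma pvBit_zero_of_ge (n : Int) (hn : 0 ≤ n) (k : Nat)
    (hk : PySem.Int.bitLength n ≤ k) : pvBit n k = 0 := by
  have hlt : n < 2 ^ k := by
    have h1 : n.natAbs < 2 ^ PySem.Int.bitLength n := PySem.Int.lt_two_pow_bitLength n
    have h2 : (2:Nat) ^ PySem.Int.bitLength n ≤ 2 ^ k := Nat.pow_le_pow_right (by omega) hk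
    have h3 : n.natAbs < 2 ^ k := lt_of_lt_of_le h1 h2
    have h4 : ((2 ^ k : Nat) : Int) = 2 ^ k := by push_cast; ring
    omega
  unfold pvBit
  rw [PySem.Int.floordiv_eq_ediv_of_pos (by positivity : (0:Int) < 2 ^ k)]
  rw [Int.ediv_eq_zero_of_lt hn hlt]
  simp [PySem.Int.mod]

-- the loop produces the LSB-first bit list, appended to the accumulator
lemma aBinarioLoop_eq (m : Nat) : ∀ (n : Int), n.toNat = m → 0 ≤ n → ∀ res,
    aBinarioLoop n res = res ++ (List.range (PySem.Int.bitLength n)).map (pvBit n) := by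
  induction m using Nat.strong_induction_on with
  | _ m ih =>
    intro n hm hn res
    by_cases h : n > 0
    · rw [aBinarioLoop]
      simp only [h, dif_pos]
      have h2 : (0:Int) < 2 := by omega
      have hfd : PySem.Int.floordiv n 2 = n / 2 := PySem.Int.floordiv_eq_ediv_of_pos h2
      have hlt : (PySem.Int.floordiv n 2).toNat < m := by rw [hfd]; omega
      rw [ih _ hlt _ rfl (by rw [hfd]; omega)]
      rw [PySem.Int.bitLength_of_pos h]
      rw [List.range_succ_eq_map, List.map_cons, List.map_map]
      have hb0 : pvBit n 0 = PySem.Int.mod n 2 := by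
        unfold pvBit
        rw [pow_zero, PySem.Int.floordiv_eq_ediv_of_pos (by omega : (0:Int) < 1), Int.ediv_one]
      have hfun : (pvBit n) ∘ Nat.succ = pvBit (PySem.Int.floordiv n 2) := by
        funext k
        simp [Function.comp, Nat.succ_eq_add_one, pvBit_succ n k]
      rw [hfun, hb0]
      simp
    · rw [aBinarioLoop]
      have hn0 : n = 0 := by omega
      simp [hn0, PySem.Int.bitLength_zero]

-- the padded LSB list is the full-width LSB list
lemma padded_eq (n : Int) (hn : 0 ≤ n) :
    (List.range (PySem.Int.bitLength n)).map (pvBit n)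
      ++ List.replicate (max 8 (PySem.Int.bitLength n) - PySem.Int.bitLength n) 0
    = (List.range (max 8 (PySem.Int.bitLength n))).map (pvBit n) := by
  set b := PySem.Int.bitLength n with hb
  have hw : max 8 b = b + (max 8 b - b) := by omega
  rw [hw, List.range_add, List.map_append, List.map_map]
  congr 1
  have : ∀ x ∈ (List.range (max 8 b - b)).map (pvBit n ∘ (b + ·)), x = (0:Int) := by
    intro x hx
    simp only [List.mem_map, List.mem_range] at hx
    obtain ⟨j, _, rfl⟩ := hx
    exact pvBit_zero_of_ge n hn (b + j) (by omega)
  have hlen := List.eq_replicate_of_mem this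
  simp only [List.length_map, List.length_range] at hlen
  rw [Nat.add_sub_cancel_left]
  exact hlen.symm

-- ===== VERDICT (by name: the statement is the Claim_ definition above) =====
theorem aBinario_spec : Claim_equal_aBinario := by
  intro oct _
  unfold Spec_aBinario aBinario aBinario_alt
  by_cases h : oct > 0
  · simp only [h, if_pos]
    rw [aBinarioLoop_eq oct.toNat oct rfl (by omega) []]
    set b := PySem.Int.bitLength oct with hb
    have hpad : ((8 : Int) - ((((List.range b).map (pvBit oct)).length : Nat) : Int)).toNat
        = max 8 b - b := by simp; omega
    rw [List.nil_append, hpad, padded_eq oct (by omega)]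
    have hwidth : (max 8 ((b : Nat) : Int)) = ((max 8 b : Nat) : Int) := by push_cast; ring
    rw [hwidth, PySem.List.pyRange_neg_one_eq_reverse, List.map_reverse]
    congr 1
    rw [show ((-1 : Int) + 1) = 0 by ring, PySem.List.pyRange_one, List.map_map]
    have ht : ((((max 8 b : Nat) : Int) - 1 + 1) - 0).toNat = max 8 b := by omega
    rw [ht]
    apply List.map_congr_left
    intro k hk
    simp [pvBit, Function.comp]
  · rw [aBinarioLoop]
    simp only [h]
    norm_num
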